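-- pv_equiv track=rewrite | github.com/sotsaka/ytdlpgui | gui.py | __trierEnfants
-- ===== SOURCE A (Python) =====
-- def __trierEnfants(listDeNoeud):
--     dico = dict(listDeNoeud)
--     names = dico.keys()
--     names = sorted(names)
--     res = []
--     for name in names:
--         res.append((name, dico[name]))
--     return res
-- ===== SOURCE B (Python) =====
-- def __trierEnfants(listDeNoeud):
--     # One backward pass keeps the last value for each name (no dict built),
--     # then a single sort of the surviving pairs by name.
--     res = []
--     seen = set()
--     for name, value in reversed(listDeNoeud):
--         if name not in seen:
--             seen.add(name)
--             res.append((name, value))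
--     return sorted(res, key=lambda p: p[0])
-- ===== Notes on version B (the rewrite author's own statement) =====
-- stated objective: alternative
-- what changed: Instead of building a dict, sorting its keys and looking each key up again, B makes one backward pass over the pairs with a seen-set keeping the last value per name, then sorts the surviving pairs by name once.
import Mathlib
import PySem

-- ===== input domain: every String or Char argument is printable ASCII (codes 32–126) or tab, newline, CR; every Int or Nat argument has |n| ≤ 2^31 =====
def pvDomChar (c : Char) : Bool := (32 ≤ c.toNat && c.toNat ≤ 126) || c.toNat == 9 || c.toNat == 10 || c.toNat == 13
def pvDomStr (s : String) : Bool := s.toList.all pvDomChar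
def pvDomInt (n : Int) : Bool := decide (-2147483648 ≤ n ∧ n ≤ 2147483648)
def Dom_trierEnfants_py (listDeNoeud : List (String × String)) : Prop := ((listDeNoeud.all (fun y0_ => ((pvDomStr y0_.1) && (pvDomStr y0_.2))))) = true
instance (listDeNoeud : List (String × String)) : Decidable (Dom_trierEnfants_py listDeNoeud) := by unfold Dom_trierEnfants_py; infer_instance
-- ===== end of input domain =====

-- B replaces A's dict-then-sorted-keys-then-lookup with one backward dedup pass plus a single sort of the pairs (alternative decomposition, same cost).

-- ===== PORT A =====
def trierEnfants_py (listDeNoeud : List (String × String)) : List (String × String) :=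
  let dico := PySem.Dict.ofList listDeNoeud
  let names := dico.keys
  let names := PySem.List.sorted names (fun x => x) false
  -- dico[name]: name ranges over dico.keys, so get? is always some; (get?).getD "" is exact here
  names.foldl (fun res name => res ++ [(name, (dico.get? name).getD "")]) []

-- ===== PORT B =====
-- the 'for name, value in reversed(listDeNoeud)' loop of Source B, state (res, seen)
def pvCollect : List (String × String) → List (String × String) → PySem.Set String → List (String × String)
  | [], res, _ => res
  | p :: t, res, seen =>
      if p.1 ∈ seen then pvCollect t res seen
      else pvCollect t (res ++ [p]) (PySem.Set.add seen p.1)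

def trierEnfants_py_alt (listDeNoeud : List (String × String)) : List (String × String) :=
  PySem.List.sorted (pvCollect listDeNoeud.reverse [] PySem.Set.empty) (fun p => p.1) false

-- ===== PRECONDITION & SPEC =====
def Spec_trierEnfants_py (listDeNoeud : List (String × String)) (out : List (String × String)) : Prop := out = trierEnfants_py_alt listDeNoeud
instance (listDeNoeud : List (String × String)) (out : List (String × String)) : Decidable (Spec_trierEnfants_py listDeNoeud out) := by unfold Spec_trierEnfants_py; infer_instance

-- ===== CLAIM (what is proved, stated in full; the proofs are below) =====
def Claim_equal_trierEnfants_py : Prop := ∀ (listDeNoeud : List (String × String)), Dom_trierEnfants_py listDeNoeud → Spec_trierEnfants_py listDeNoeud (trierEnfants_py listDeNoeud)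

-- ===== LEMMAS AND PROOFS =====

/-- value Python's `dict(l)[k]` yields, as a function of `r = l.reverse` (last wins). -/
def pvFVal (k : String) (r : List (String × String)) : String :=
  match r.find? (fun p => p.1 == k) with
  | some p => p.2
  | none => ""

/-- the keys pvCollect picks from `r`, given already-seen keys. -/
def pvPick : List (String × String) → PySem.Set String → List String
  | [], _ => []
  | p :: t, seen => if p.1 ∈ seen then pvPick t seen else p.1 :: pvPick t (PySem.Set.add seen p.1)

theorem pvPick_mem (r : List (String × String)) (seen : PySem.Set String) (k : String) :
    k ∈ pvPick r seen ↔ k ∈ r.map Prod.fst ∧ k ∉ seen := by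
  induction r generalizing seen with
  | nil => simp [pvPick]
  | cons p t ih =>
    by_cases h : p.1 ∈ seen
    · simp only [pvPick, if_pos h, ih, List.map_cons, List.mem_cons]
      constructor
      · rintro ⟨hk, hs⟩; exact ⟨Or.inr hk, hs⟩
      · rintro ⟨hk | hk, hs⟩
        · exact absurd (hk ▸ h) hs
        · exact ⟨hk, hs⟩
    · simp only [pvPick, if_neg h, ih, PySem.Set.mem_add, List.map_cons, List.mem_cons]
      constructor
      · rintro (rfl | ⟨hk, hs⟩)
        · exact ⟨Or.inl rfl, h⟩
        · exact ⟨Or.inr hk, fun hm => hs (Or.inl hm)⟩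
      · rintro ⟨hk | hk, hs⟩
        · exact Or.inl hk
        · by_cases hkp : k = p.1
          · exact Or.inl hkp
          · exact Or.inr ⟨hk, fun hm => (hm.elim hs fun e => hkp e)⟩

theorem pvPick_nodup (r : List (String × String)) (seen : PySem.Set String) :
    (pvPick r seen).Nodup := by
  induction r generalizing seen with
  | nil => simp [pvPick]
  | cons p t ih =>
    by_cases h : p.1 ∈ seen
    · simpa [pvPick, if_pos h] using ih seen
    · rw [pvPick, if_neg h]
      refine List.Nodup.cons (fun hm => ?_) (ih (PySem.Set.add seen p.1))
      have := ((pvPick_mem t (PySem.Set.add seen p.1) p.1).1 hm).2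
      exact this ((PySem.Set.mem_add _ _ _).2 (Or.inr rfl))

theorem pvCollect_eq (r : List (String × String)) (res : List (String × String)) (seen : PySem.Set String) :
    pvCollect r res seen = res ++ (pvPick r seen).map (fun k => (k, pvFVal k r)) := by
  induction r generalizing res seen with
  | nil => simp [pvCollect, pvPick]
  | cons p t ih =>
    by_cases h : p.1 ∈ seen
    · rw [pvCollect, if_pos h, ih, pvPick, if_pos h]
      congr 1
      refine List.map_congr_left fun k hk => ?_
      have hks : k ∉ seen := ((pvPick_mem t seen k).1 hk).2
      have hne : (p.1 == k) = false := by
        simp only [beq_eq_false_iff_ne]; rintro rfl; exact hks h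
      simp [pvFVal, List.find?, hne]
    · rw [pvCollect, if_neg h, ih, pvPick, if_neg h]
      have hhead : pvFVal p.1 (p :: t) = p.2 := by simp [pvFVal, List.find?]
      simp only [List.map_cons, hhead, List.append_assoc, List.singleton_append]
      congr 2
      refine List.map_congr_left fun k hk => ?_
      have hks : k ∉ PySem.Set.add seen p.1 := ((pvPick_mem t _ k).1 hk).2
      have hne : (p.1 == k) = false := by
        simp only [beq_eq_false_iff_ne]
        rintro rfl; exact hks ((PySem.Set.mem_add _ _ _).2 (Or.inr rfl))
      simp [pvFVal, List.find?, hne]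

theorem pvGet_foldl (l : List (String × String)) (d : PySem.Dict String String) (k : String) :
    (l.foldl (fun d p => d.insert p.1 p.2) d).get? k =
      match l.reverse.find? (fun p => p.1 == k) with
      | some p => some p.2
      | none => d.get? k := by
  induction l generalizing d with
  | nil => simp
  | cons p t ih =>
    rw [List.foldl_cons, ih, List.reverse_cons, List.find?_append]
    cases hf : t.reverse.find? (fun p => p.1 == k) with
    | some q => simp
    | none =>
      cases hp : (p.1 == k) with
      | true =>
        have : k = p.1 := (beq_iff_eq.1 hp).symm
        simp [List.find?, this, PySem.Dict.get?_insert_self]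
      | false =>
        have : k ≠ p.1 := fun e => by simp [e] at hp
        simp [List.find?, hp, PySem.Dict.get?_insert, this]

theorem pvFoldl_app_map (ks : List String) (acc : List (String × String)) (f : String → String × String) :
    ks.foldl (fun res k => res ++ [f k]) acc = acc ++ ks.map f := by
  induction ks generalizing acc with
  | nil => simp
  | cons k t ih => simp [ih]

-- ===== VERDICT (by name: the statement is the Claim_ definition above) =====
theorem trierEnfants_py_spec : Claim_equal_trierEnfants_py := by
  intro l _
  unfold Spec_trierEnfants_py
  have hget : ∀ k : String, ((PySem.Dict.ofList l).get? k).getD "" = pvFVal k l.reverse := by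
    intro k
    rw [show (PySem.Dict.ofList l) = l.foldl (fun d p => d.insert p.1 p.2) PySem.Dict.empty from rfl,
      pvGet_foldl]
    cases hf : l.reverse.find? (fun p => p.1 == k) <;> simp [pvFVal, hf]
  have hkeys : (PySem.Dict.ofList l).keys = PySem.Set.ofList (l.map Prod.fst) := by
    rw [show (PySem.Dict.ofList l) = l.foldl (fun d p => d.insert p.1 p.2) PySem.Dict.empty from rfl,
      PySem.Dict.keys_foldl_insert_key]
    simp [PySem.Set.update_nil_left]
  have hA : trierEnfants_py l =
      (PySem.List.sorted (PySem.Set.ofList (l.map Prod.fst)) (fun x => x) false).map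
        (fun k => (k, pvFVal k l.reverse)) := by
    unfold trierEnfants_py
    rw [pvFoldl_app_map, hkeys, List.nil_append]
    exact List.map_congr_left fun k _ => by rw [hget]
  have hB : pvCollect l.reverse [] PySem.Set.empty =
      (pvPick l.reverse []).map (fun k => (k, pvFVal k l.reverse)) := by
    simpa using pvCollect_eq l.reverse [] PySem.Set.empty
  have hS : (PySem.Set.ofList (l.map Prod.fst)).Perm (pvPick l.reverse []) := by
    refine (List.perm_ext_iff_of_nodup (PySem.Set.nodup_ofList _) (pvPick_nodup _ _)).2 fun k => ?_
    simp [PySem.Set.mem_ofList, pvPick_mem]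
  have hperm : ((PySem.List.sorted (PySem.Set.ofList (l.map Prod.fst)) (fun x => x) false).map
      (fun k => (k, pvFVal k l.reverse))).Perm
      ((pvPick l.reverse []).map (fun k => (k, pvFVal k l.reverse))) :=
    ((PySem.List.sorted_perm _ _ _).trans hS).map _
  have hpair : ((PySem.List.sorted (PySem.Set.ofList (l.map Prod.fst)) (fun x => x) false).map
      (fun k => (k, pvFVal k l.reverse))).Pairwise (fun a b => a.1 < b.1) := by
    rw [List.pairwise_map]
    exact PySem.List.sorted_ofList_pairwise_lt _
  rw [hA, trierEnfants_py_alt, hB]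
  exact Eq.symm (PySem.List.sorted_eq_of_perm_of_pairwise_lt _ _ (fun p => p.1) hperm hpair)
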